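-- pv_equiv track=rewrite | github.com/dev-david-alves/Genetic-Algorithm-Python | main.py | r1
-- ===== SOURCE A (Python) =====
-- def r1(genome, min, max):
--   fault = 0
--   for j in range(len(genome[0])):
--     sum_ = 0
--     for i in range(len(genome)):
--       sum_ += genome[i][j]
--
--     fault += int(min > sum_ or sum_ > max)
--
--   return -fault
-- ===== SOURCE B (Python) =====
-- def r1(genome, min, max):
--     sums = [0] * len(genome[0])
--     for row in genome:
--         sums = [s + row[j] for j, s in enumerate(sums)]
--     return -sum(1 for s in sums if not (min <= s <= max))
-- ===== Notes on version B (the rewrite author's own statement) =====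
-- stated objective: alternative
-- what changed: Replaces the column-major nested loops with a row-major build of a column-sums table followed by a separate counting pass.
import Mathlib
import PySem

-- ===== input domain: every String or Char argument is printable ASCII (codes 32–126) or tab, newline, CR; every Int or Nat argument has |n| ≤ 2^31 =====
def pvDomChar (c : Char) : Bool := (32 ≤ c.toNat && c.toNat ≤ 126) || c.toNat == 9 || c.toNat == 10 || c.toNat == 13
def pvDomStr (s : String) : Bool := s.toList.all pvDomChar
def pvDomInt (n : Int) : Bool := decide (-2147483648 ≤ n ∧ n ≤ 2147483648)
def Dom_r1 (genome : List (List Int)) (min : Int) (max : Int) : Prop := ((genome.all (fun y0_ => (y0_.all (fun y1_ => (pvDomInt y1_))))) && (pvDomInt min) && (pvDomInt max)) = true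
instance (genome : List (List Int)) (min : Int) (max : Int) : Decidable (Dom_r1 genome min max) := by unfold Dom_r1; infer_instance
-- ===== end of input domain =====

-- B builds a full column-sums table row by row and counts out-of-range sums in a
-- separate pass, instead of A's column-major nested loops with a reused scalar.

-- ===== PORT A =====
def r1 (genome : List (List Int)) (min : Int) (max : Int) : Int :=
  let fault := ((List.range (genome.headD []).length).foldl (fun fault j =>
    let sum_ := (List.range genome.length).foldl
      (fun s i => s + ((genome.getD i []).getD j 0)) 0
    fault + (if min > sum_ ∨ sum_ > max then (1 : Int) else 0)) 0)
  Neg.neg fault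

-- ===== PORT B =====
def r1_alt (genome : List (List Int)) (min : Int) (max : Int) : Int :=
  let sums := (genome.foldl
    (fun sums row => sums.zipIdx.map (fun p => p.1 + row.getD p.2 0))
    (List.replicate (genome.headD []).length (0 : Int)))
  Neg.neg (sums.foldl (fun c s => if min ≤ s ∧ s ≤ max then c else c + 1) (0 : Int))

-- ===== PRECONDITION & SPEC =====
-- Pre_ excludes exactly the inputs where Python A raises (IndexError): the empty
-- genome (genome[0]) and jagged genomes with a row shorter than the first row.
def Pre_r1 (genome : List (List Int)) (min : Int) (max : Int) : Prop :=
  genome ≠ [] ∧ ∀ row ∈ genome, (genome.headD []).length ≤ row.length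
instance (genome : List (List Int)) (min : Int) (max : Int) : Decidable (Pre_r1 genome min max) := by unfold Pre_r1; infer_instance

def pvWitness_r1 : List (List Int) × Int × Int := ([[1, 2], [3, 4]], 0, 5)

def Spec_r1 (genome : List (List Int)) (min : Int) (max : Int) (out : Int) : Prop := out = r1_alt genome min max
instance (genome : List (List Int)) (min : Int) (max : Int) (out : Int) : Decidable (Spec_r1 genome min max out) := by unfold Spec_r1; infer_instance

-- ===== CLAIM =====
def Claim_equal_r1 : Prop := ∀ (genome : List (List Int)) (min : Int) (max : Int), Dom_r1 genome min max → Pre_r1 genome min max → Spec_r1 genome min max (r1 genome min max)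

-- ===== LEMMAS AND PROOFS =====

-- A's inner index loop over range(len(genome)) is a fold over the rows themselves.
theorem pv_sumIdx (l : List (List Int)) (j : Nat) : ∀ init : Int,
    (List.range l.length).foldl (fun s i => s + ((l.getD i []).getD j 0)) init
      = l.foldl (fun s row => s + row.getD j 0) init := by
  induction l with
  | nil => intro init; simp
  | cons a t ih =>
    intro init
    simp only [List.length_cons, List.range_succ_eq_map, List.foldl_cons, List.foldl_map,
      List.getD_cons_zero, List.getD_cons_succ]
    exact ih _

-- one row-step of B's table update, on a table given as a map over range w
theorem pv_step (w : Nat) (f : Nat → Int) (r : List Int) :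
    ((List.range w).map f).zipIdx.map (fun p => p.1 + r.getD p.2 0)
      = (List.range w).map (fun j => f j + r.getD j 0) := by
  apply List.ext_getElem
  · simp
  · intro k h1 h2
    simp [List.getElem_zipIdx]

-- B's fold over the rows keeps the table equal to a map of per-column partial sums.
theorem pv_sums (rows : List (List Int)) : ∀ (w : Nat) (f : Nat → Int),
    rows.foldl (fun sums row => sums.zipIdx.map (fun p => p.1 + row.getD p.2 0))
        ((List.range w).map f)
      = (List.range w).map (fun j => rows.foldl (fun s row => s + row.getD j 0) (f j)) := by
  induction rows with
  | nil => intro w f; simp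
  | cons r t ih =>
    intro w f
    rw [List.foldl_cons, pv_step, ih]
    have : ∀ j, t.foldl (fun s row => s + row.getD j 0) (f j + r.getD j 0)
        = (r :: t).foldl (fun s row => s + row.getD j 0) (f j) := by
      intro j; simp [List.foldl_cons]
    simp only [this]

theorem r1_eq (genome : List (List Int)) (min max : Int) :
    r1 genome min max = r1_alt genome min max := by
  unfold r1 r1_alt
  have hrep : List.replicate (genome.headD []).length (0 : Int)
      = (List.range (genome.headD []).length).map (fun _ => (0 : Int)) := by
    simp [List.map_const']
  rw [hrep, pv_sums]
  simp only [List.foldl_map]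
  congr 1
  apply PySem.List.foldl_congr_mem
  intro c j _
  rw [pv_sumIdx]
  split_ifs with h1 h2 <;> omega

-- ===== VERDICT =====
theorem r1_spec : Claim_equal_r1 := by
  intro genome min max _ _
  unfold Spec_r1
  exact r1_eq genome min max
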